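-- pv_equiv track=rewrite | github.com/Mrice90/Desolate-Tuba | deck_builder.py | get_deck_size_for_level
-- ===== SOURCE A (Python) =====
-- _LEVEL_INCREMENTS = {1: 3, 2: 1, 3: 1, 4: 1, 5: 2, 6: 1, 7: 1, 8: 2, 9: 1, 10: 2}
--
-- def get_deck_size_for_level(level: int) -> int:
--     """Return total number of cards allowed for a given level."""
--     total = 0
--     for lv in range(1, level + 1):
--         if lv <= 10:
--             total += _LEVEL_INCREMENTS.get(lv, 0)
--         else:
--             total += 2
--     return min(35, total)
-- ===== SOURCE B (Python) =====
-- # Closed form: prefix-sum table for levels 1..10, arithmetic formula beyond; O(1) instead of O(level).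
-- _PREFIX_TOTALS = (0, 3, 4, 5, 6, 8, 9, 10, 12, 13, 15)
--
-- def get_deck_size_for_level(level: int) -> int:
--     """Return total number of cards allowed for a given level."""
--     if level <= 0:
--         return 0
--     if level <= 10:
--         return _PREFIX_TOTALS[level]
--     return min(35, 15 + 2 * (level - 10))
-- ===== Notes on version B (the rewrite author's own statement) =====
-- stated objective: faster
-- what changed: Replaced the O(level) loop over range(1, level+1) with an O(1) lookup in a precomputed prefix-sum table for levels 1-10 and the closed form min(35, 15 + 2*(level-10)) beyond level 10.
import Mathlib
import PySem

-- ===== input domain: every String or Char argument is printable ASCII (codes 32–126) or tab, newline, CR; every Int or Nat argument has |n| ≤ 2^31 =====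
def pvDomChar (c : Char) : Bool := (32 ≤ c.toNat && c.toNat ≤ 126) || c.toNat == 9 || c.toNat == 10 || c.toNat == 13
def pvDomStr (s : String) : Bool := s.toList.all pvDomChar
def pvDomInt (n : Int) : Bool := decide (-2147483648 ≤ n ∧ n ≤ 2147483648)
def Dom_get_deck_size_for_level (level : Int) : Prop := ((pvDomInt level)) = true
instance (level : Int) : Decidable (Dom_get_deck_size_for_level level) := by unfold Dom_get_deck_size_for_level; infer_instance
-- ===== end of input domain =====

-- B replaces A's O(level) summation loop with an O(1) prefix-sum table + closed form (faster, asymptotic).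


-- ===== PORT A =====
def pvLevelIncrements : PySem.Dict Int Int :=
  PySem.Dict.ofList [(1, 3), (2, 1), (3, 1), (4, 1), (5, 2), (6, 1), (7, 1), (8, 2), (9, 1), (10, 2)]

def get_deck_size_for_level (level : Int) : Int :=
  let total :=
    (PySem.List.pyRange 1 (level + 1) 1).foldl
      (fun total lv => if lv ≤ 10 then total + pvLevelIncrements.getD lv 0 else total + 2) 0
  min 35 total

-- ===== PORT B =====
def pvPrefixTotals : List Int := [0, 3, 4, 5, 6, 8, 9, 10, 12, 13, 15]

def get_deck_size_for_level_alt (level : Int) : Int :=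
  if level ≤ 0 then 0
  else if level ≤ 10 then
    -- tuple index; the guards keep 1 ≤ level ≤ 10 in range, so the lookup never fails
    (PySem.List.pyGet? pvPrefixTotals level).getD 0
  else min 35 (15 + 2 * (level - 10))

-- ===== PRECONDITION & SPEC =====
def Spec_get_deck_size_for_level (level : Int) (out : Int) : Prop := out = get_deck_size_for_level_alt level
instance (level : Int) (out : Int) : Decidable (Spec_get_deck_size_for_level level out) := by unfold Spec_get_deck_size_for_level; infer_instance

-- ===== CLAIM (what is proved, stated in full; the proofs are below) =====
def Claim_equal_get_deck_size_for_level : Prop := ∀ (level : Int), Dom_get_deck_size_for_level level → Spec_get_deck_size_for_level level (get_deck_size_for_level level)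

-- ===== LEMMAS AND PROOFS =====

-- A's loop body adds exactly 2 for every element > 10
theorem pv_fold_big (l : List Int) (h : ∀ x ∈ l, 10 < x) (init : Int) :
    l.foldl (fun total lv => if lv ≤ 10 then total + pvLevelIncrements.getD lv 0 else total + 2) init
      = init + 2 * l.length := by
  induction l generalizing init with
  | nil => simp
  | cons a t ih =>
    have ha : 10 < a := h a (by simp)
    simp only [List.foldl_cons, if_neg (by omega : ¬ a ≤ 10)]
    rw [ih (fun x hx => h x (by simp [hx]))]
    simp; ring

-- A's loop value for level ≥ 10 is the closed form 15 + 2*(level - 10)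
theorem pv_loop_ge_10 (level : Int) (h : 10 ≤ level) :
    (PySem.List.pyRange 1 (level + 1) 1).foldl
      (fun total lv => if lv ≤ 10 then total + pvLevelIncrements.getD lv 0 else total + 2) 0
      = 15 + 2 * (level - 10) := by
  rw [PySem.List.pyRange_one_append 1 11 (level + 1) (by omega) (by omega), List.foldl_append]
  have h15 : (PySem.List.pyRange 1 11 1).foldl
      (fun total lv => if lv ≤ 10 then total + pvLevelIncrements.getD lv 0 else total + 2) 0 = 15 := by
    decide
  rw [h15, pv_fold_big _ (fun x hx => by
        have := (PySem.List.mem_pyRange_one).1 hx; omega)]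
  rw [PySem.List.length_pyRange_one]
  have : ((level + 1 - 11).toNat : Int) = level - 10 := by omega
  omega

-- ===== VERDICT (by name: the statement is the Claim_ definition above) =====
theorem get_deck_size_for_level_spec : Claim_equal_get_deck_size_for_level := by
  unfold Claim_equal_get_deck_size_for_level
  intro level _
  unfold Spec_get_deck_size_for_level get_deck_size_for_level get_deck_size_for_level_alt
  by_cases h0 : level ≤ 0
  · rw [PySem.List.pyRange_one_eq_nil (by omega)]
    simp [h0]
  · by_cases h10 : level ≤ 10
    · interval_cases level <;> decide
    · rw [pv_loop_ge_10 level (by omega)]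
      simp [h0, h10]
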